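-- pv_equiv track=rewrite | github.com/inigoarr/Distributed-Systems-2019-20- | matrices.py | CalcNumCasillas
-- ===== SOURCE A (Python) =====
-- M = 200
--
-- L = 200
--
-- def CalcNumCasillas(workers):
--     iterdata = []
--     if workers > M*L:
--         workers = M*L
--     casilla_ini = int(0)
--     num_casillas_pred = int((M * L)/workers)
--     resto = int((M * L) % workers)
--     for i in range(workers):
--         if resto > 0:
--             iterdata.append([int(casilla_ini), int(num_casillas_pred + 1)])
--             resto -= 1
--             casilla_ini += num_casillas_pred + 1
--         else:
--             iterdata.append([int(casilla_ini), int(num_casillas_pred)])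
--             casilla_ini += num_casillas_pred
--
--     return iterdata
-- ===== SOURCE B (Python) =====
-- M = 200
--
-- L = 200
--
-- def CalcNumCasillas(workers):
--     total = M * L
--     if workers > total:
--         workers = total
--     pred, resto = divmod(total, workers)
--     return [[i * (pred + 1), pred + 1] if i < resto
--             else [resto * (pred + 1) + (i - resto) * pred, pred]
--             for i in range(workers)]
-- ===== Notes on version B (the rewrite author's own statement) =====
-- stated objective: simpler
-- what changed: Replaced the loop that threads a running offset and a decrementing remainder through mutable state by a single comprehension computing each [start, count] pair independently from a closed form on the index.
import Mathlib
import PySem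

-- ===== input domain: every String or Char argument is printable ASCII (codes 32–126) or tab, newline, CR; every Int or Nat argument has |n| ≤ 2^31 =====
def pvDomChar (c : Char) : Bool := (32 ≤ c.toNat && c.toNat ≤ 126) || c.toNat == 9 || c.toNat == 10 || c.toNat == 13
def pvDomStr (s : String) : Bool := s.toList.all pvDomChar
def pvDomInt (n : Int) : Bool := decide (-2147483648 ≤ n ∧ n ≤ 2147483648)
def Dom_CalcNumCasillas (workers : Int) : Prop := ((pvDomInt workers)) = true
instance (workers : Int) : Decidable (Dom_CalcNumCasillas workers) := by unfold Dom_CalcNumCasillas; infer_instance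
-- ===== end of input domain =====

-- B replaces A's running-offset/decrementing-remainder loop by a comprehension computing each [start, count] pair from a closed form on the index (objective: simpler).


-- ===== PORT A =====
-- 'int((M*L)/workers)' is float true division then int(): truncation toward zero; for
-- 40000 and |workers| ≤ 2^31 the double is never rounded past an integer, so Int.tdiv is exact here.
def CalcNumCasillas (workers : Int) : List (List Int) :=
  let workers : Int := if workers > 200 * 200 then 200 * 200 else workers
  let num_casillas_pred : Int := Int.tdiv (200 * 200) workers
  let resto : Int := PySem.Int.mod (200 * 200) workers
  let fin : List (List Int) × Int × Int :=
    (PySem.List.pyRange 0 workers 1).foldl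
      (fun (st : List (List Int) × Int × Int) _i =>
        if st.2.2 > 0 then
          (st.1 ++ [[st.2.1, num_casillas_pred + 1]], st.2.1 + (num_casillas_pred + 1), st.2.2 - 1)
        else
          (st.1 ++ [[st.2.1, num_casillas_pred]], st.2.1 + num_casillas_pred, st.2.2))
      ([], 0, resto)
  fin.1

-- ===== PORT B =====
def CalcNumCasillas_alt (workers : Int) : List (List Int) :=
  let total : Int := 200 * 200
  let workers : Int := if workers > total then total else workers
  let pred : Int := PySem.Int.floordiv total workers
  let resto : Int := PySem.Int.mod total workers
  (PySem.List.pyRange 0 workers 1).map (fun i =>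
    if i < resto then [i * (pred + 1), pred + 1]
    else [resto * (pred + 1) + (i - resto) * pred, pred])

-- ===== PRECONDITION & SPEC =====
-- Pre_ excludes exactly workers = 0, where Python A raises ZeroDivisionError.
def Pre_CalcNumCasillas (workers : Int) : Prop := workers ≠ 0
instance (workers : Int) : Decidable (Pre_CalcNumCasillas workers) := by unfold Pre_CalcNumCasillas; infer_instance
def pvWitness_CalcNumCasillas : Int := 7

def Spec_CalcNumCasillas (workers : Int) (out : List (List Int)) : Prop := out = CalcNumCasillas_alt workers
instance (workers : Int) (out : List (List Int)) : Decidable (Spec_CalcNumCasillas workers out) := by unfold Spec_CalcNumCasillas; infer_instance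

-- ===== CLAIM (what is proved, stated in full; the proofs are below) =====
def Claim_equal_CalcNumCasillas : Prop := ∀ (workers : Int), Dom_CalcNumCasillas workers → Pre_CalcNumCasillas workers → Spec_CalcNumCasillas workers (CalcNumCasillas workers)

-- ===== LEMMAS AND PROOFS =====

-- closed-form start offset for chunk i
def pvStart (pred resto i : Int) : Int :=
  if i < resto then i * (pred + 1) else resto * (pred + 1) + (i - resto) * pred

def pvChunk (pred resto i : Int) : List Int :=
  if i < resto then [i * (pred + 1), pred + 1] else [resto * (pred + 1) + (i - resto) * pred, pred]

-- loop invariant: folding A's body over indices [j, j+n) from state (acc, start j, max (resto-j) 0)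
-- appends exactly the closed-form chunks and advances the state accordingly
theorem pvLoop (pred resto : Int) (hr : 0 ≤ resto) :
    ∀ (n : ℕ) (j : Int) (acc : List (List Int)), 0 ≤ j →
    (PySem.List.pyRange j (j + n) 1).foldl
      (fun (st : List (List Int) × Int × Int) _i =>
        if st.2.2 > 0 then
          (st.1 ++ [[st.2.1, pred + 1]], st.2.1 + (pred + 1), st.2.2 - 1)
        else
          (st.1 ++ [[st.2.1, pred]], st.2.1 + pred, st.2.2))
      (acc, pvStart pred resto j, max (resto - j) 0)
    = (acc ++ (PySem.List.pyRange j (j + n) 1).map (pvChunk pred resto),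
       pvStart pred resto (j + n), max (resto - (j + n)) 0) := by
  intro n
  induction n with
  | zero =>
    intro j acc hj
    simp [PySem.List.pyRange_one_eq_nil (le_refl j)]
  | succ n ih =>
    intro j acc hj
    have hjlt : j < j + (n + 1 : ℕ) := by push_cast; omega
    rw [PySem.List.pyRange_one_cons hjlt]
    simp only [List.foldl_cons, List.map_cons]
    have harr : j + ((n : ℕ) + 1 : ℕ) = (j + 1) + (n : ℕ) := by push_cast; omega
    by_cases hcase : j < resto
    · have hpos : max (resto - j) 0 > 0 := by omega
      rw [if_pos hpos]
      have h1 : pvStart pred resto j + (pred + 1) = pvStart pred resto (j + 1) := by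
        unfold pvStart
        rw [if_pos hcase]
        by_cases h2 : j + 1 < resto
        · rw [if_pos h2]; ring
        · rw [if_neg h2]
          have hre : resto = j + 1 := by omega
          subst hre; ring
      have h2 : max (resto - j) 0 - 1 = max (resto - (j + 1)) 0 := by omega
      have h3 : pvChunk pred resto j = [pvStart pred resto j, pred + 1] := by
        unfold pvChunk pvStart; rw [if_pos hcase, if_pos hcase]
      rw [h1, h2, harr, ih (j + 1) _ (by omega), h3]
      simp
    · have hnpos : ¬ (max (resto - j) 0 > 0) := by omega
      rw [if_neg hnpos]
      have h1 : pvStart pred resto j + pred = pvStart pred resto (j + 1) := by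
        unfold pvStart
        rw [if_neg hcase, if_neg (by omega : ¬ j + 1 < resto)]
        ring
      have h2 : max (resto - j) 0 = max (resto - (j + 1)) 0 := by omega
      have h3 : pvChunk pred resto j = [pvStart pred resto j, pred] := by
        unfold pvChunk pvStart; rw [if_neg hcase, if_neg hcase]
      rw [h1]
      conv_lhs => rw [h2]
      rw [harr, ih (j + 1) _ (by omega), h3]
      simp

-- pvLoop specialised to the loop's actual initial state ([], 0, r) over range(n)
theorem pvLoop0 (pred r : Int) (hr : 0 ≤ r) (n : ℕ) :
    ((PySem.List.pyRange 0 (n : Int) 1).foldl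
      (fun (st : List (List Int) × Int × Int) _i =>
        if st.2.2 > 0 then
          (st.1 ++ [[st.2.1, pred + 1]], st.2.1 + (pred + 1), st.2.2 - 1)
        else
          (st.1 ++ [[st.2.1, pred]], st.2.1 + pred, st.2.2))
      ([], 0, r)).1
    = (PySem.List.pyRange 0 (n : Int) 1).map (pvChunk pred r) := by
  have h := pvLoop pred r hr n 0 [] (le_refl 0)
  have hs0 : pvStart pred r 0 = 0 := by
    unfold pvStart
    split_ifs with hcond
    · ring
    · have hr0 : r = 0 := by omega
      simp [hr0]
  have hm0 : max (r - 0) 0 = r := by omega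
  rw [hs0, hm0, zero_add] at h
  rw [h]
  simp

-- ===== VERDICT (by name: the statement is the Claim_ definition above) =====
theorem CalcNumCasillas_spec : Claim_equal_CalcNumCasillas := by
  intro workers _ hpre
  unfold Spec_CalcNumCasillas CalcNumCasillas CalcNumCasillas_alt
  simp only []
  set w : Int := if workers > 200 * 200 then 200 * 200 else workers with hw
  by_cases hpos : 0 < w
  · have hne : w ≠ 0 := by omega
    have htdiv : Int.tdiv (200 * 200 : Int) w = PySem.Int.floordiv (200 * 200) w := by
      rw [PySem.Int.floordiv_eq_ediv_of_pos hpos, Int.tdiv_eq_ediv]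
      simp
    rw [htdiv]
    set pred := PySem.Int.floordiv (200 * 200 : Int) w with hpredd
    set r := PySem.Int.mod (200 * 200 : Int) w with hrd
    have hr0 : 0 ≤ r := by
      rw [hrd, PySem.Int.mod_eq_emod_of_pos hpos]
      exact Int.emod_nonneg _ hne
    have hwn : w = ((w.toNat : ℕ) : Int) := by omega
    conv_lhs => rw [hwn]
    rw [pvLoop0 pred r hr0 w.toNat, ← hwn]
    congr 1
  · have h1 : PySem.List.pyRange 0 w 1 = [] := PySem.List.pyRange_one_eq_nil (by omega)
    simp [h1]
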